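-- pv_equiv track=rewrite | github.com/Anshulgada/Impact-Training | Coding Challenge 17.py | final_position
-- ===== SOURCE A (Python) =====
-- def final_position(grid, rows, cols, obstacles):
--
--     x, y = 0, 0  # Starting position
--
--     for move in grid:
--
--         if move == 'U' and y < rows - 1 and (x, y + 1) not in obstacles:
--             y += 1
--
--         elif move == 'D' and y > 0 and (x, y - 1) not in obstacles:
--             y -= 1
--
--         elif move == 'L' and x > 0 and (x - 1, y) not in obstacles:
--             x -= 1
--
--         elif move == 'R' and x < cols - 1 and (x + 1, y) not in obstacles:
--             x += 1
--
--         elif move == 'X':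
--             continue  # Obstacle encountered, do not move
--
--     return x, y
-- ===== SOURCE B (Python) =====
-- def final_position(grid, rows, cols, obstacles):
--     # Run-length algorithm: consume each maximal run of identical moves at once,
--     # computing the run's displacement in closed form from the nearest blocking
--     # obstacle (or grid edge) along that axis, instead of stepping cell by cell.
--     x, y = 0, 0
--     i, n = 0, len(grid)
--     while i < n:
--         move = grid[i]
--         j = i
--         while j < n and grid[j] == move:
--             j += 1
--         k = j - i
--         if move == 'U':
--             stop = rows - 1
--             for ox, oy in obstacles:
--                 if ox == x and y < oy:
--                     stop = min(stop, oy - 1)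
--             y = max(y, min(y + k, stop))
--         elif move == 'D':
--             stop = 0
--             for ox, oy in obstacles:
--                 if ox == x and oy < y:
--                     stop = max(stop, oy + 1)
--             y = min(y, max(y - k, stop))
--         elif move == 'L':
--             stop = 0
--             for ox, oy in obstacles:
--                 if oy == y and ox < x:
--                     stop = max(stop, ox + 1)
--             x = min(x, max(x - k, stop))
--         elif move == 'R':
--             stop = cols - 1
--             for ox, oy in obstacles:
--                 if oy == y and x < ox:
--                     stop = min(stop, ox - 1)
--             x = max(x, min(x + k, stop))
--         i = j
--     return x, y
-- ===== Notes on version B (the rewrite author's own statement) =====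
-- stated objective: alternative
-- what changed: Replaces A's per-character step simulation by a run-length algorithm: each maximal run of identical moves is consumed at once, its displacement computed in closed form (clamped by the grid edge and the nearest obstacle on the moved axis) in a single scan of the obstacle list per run.
import Mathlib
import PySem

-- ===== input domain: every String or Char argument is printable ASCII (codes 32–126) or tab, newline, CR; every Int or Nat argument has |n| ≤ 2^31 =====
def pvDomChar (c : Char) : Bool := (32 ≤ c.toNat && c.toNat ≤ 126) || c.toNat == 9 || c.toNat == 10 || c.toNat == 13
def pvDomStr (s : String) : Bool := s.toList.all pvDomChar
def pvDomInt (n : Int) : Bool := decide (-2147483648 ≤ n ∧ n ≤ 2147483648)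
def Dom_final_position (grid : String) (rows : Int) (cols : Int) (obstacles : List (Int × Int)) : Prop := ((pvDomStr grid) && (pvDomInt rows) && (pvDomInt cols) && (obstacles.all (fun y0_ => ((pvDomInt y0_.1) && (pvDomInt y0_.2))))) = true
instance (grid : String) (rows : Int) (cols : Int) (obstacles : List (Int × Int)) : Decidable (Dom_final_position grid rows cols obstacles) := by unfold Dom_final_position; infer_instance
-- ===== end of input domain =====

-- B replaces A's per-character step simulation by a run-length algorithm: each maximal
-- run of identical moves is consumed at once, in closed form (objective: alternative).

-- ===== PORT A =====
-- one iteration of A's for-loop: the if/elif chain, branch for branch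
def pvStepA (rows cols : Int) (obstacles : List (Int × Int)) (p : Int × Int) (move : Char) : Int × Int :=
  let x := p.1; let y := p.2
  if move = 'U' ∧ y < rows - 1 ∧ ¬ obstacles.contains (x, y + 1) then (x, y + 1)
  else if move = 'D' ∧ y > 0 ∧ ¬ obstacles.contains (x, y - 1) then (x, y - 1)
  else if move = 'L' ∧ x > 0 ∧ ¬ obstacles.contains (x - 1, y) then (x - 1, y)
  else if move = 'R' ∧ x < cols - 1 ∧ ¬ obstacles.contains (x + 1, y) then (x + 1, y)
  else if move = 'X' then (x, y)  -- continue: no move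
  else (x, y)

def final_position (grid : String) (rows : Int) (cols : Int) (obstacles : List (Int × Int)) : Int × Int :=
  grid.toList.foldl (pvStepA rows cols obstacles) (0, 0)

-- ===== PORT B =====
-- the four 'stop' scans of B (one for-loop over obstacles each)
def pvStopU (x y rows : Int) (obs : List (Int × Int)) : Int :=
  obs.foldl (fun s p => if p.1 = x ∧ y < p.2 then min s (p.2 - 1) else s) (rows - 1)
def pvStopD (x y : Int) (obs : List (Int × Int)) : Int :=
  obs.foldl (fun s p => if p.1 = x ∧ p.2 < y then max s (p.2 + 1) else s) 0
def pvStopL (x y : Int) (obs : List (Int × Int)) : Int :=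
  obs.foldl (fun s p => if p.2 = y ∧ p.1 < x then max s (p.1 + 1) else s) 0
def pvStopR (x y cols : Int) (obs : List (Int × Int)) : Int :=
  obs.foldl (fun s p => if p.2 = y ∧ x < p.1 then min s (p.1 - 1) else s) (cols - 1)

-- B's outer while-loop: take the maximal run of the leading character, apply its
-- closed-form displacement, continue on the rest (the inner `while j < n` scan is
-- the takeWhile/dropWhile split of the remaining characters)
def pvRunB (rows cols : Int) (obs : List (Int × Int)) : Int × Int → List Char → Int × Int
  | p, [] => p
  | (x, y), c :: rest =>
    let k : Int := 1 + (rest.takeWhile (· == c)).length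
    let tail := rest.dropWhile (· == c)
    let p' : Int × Int :=
      if c = 'U' then (x, max y (min (y + k) (pvStopU x y rows obs)))
      else if c = 'D' then (x, min y (max (y - k) (pvStopD x y obs)))
      else if c = 'L' then (min x (max (x - k) (pvStopL x y obs)), y)
      else if c = 'R' then (max x (min (x + k) (pvStopR x y cols obs)), y)
      else (x, y)
    pvRunB rows cols obs p' tail
  termination_by _ l => l.length
  decreasing_by
    simp only [List.length_cons]
    exact Nat.lt_succ_of_le (List.length_dropWhile_le _ _)

def final_position_alt (grid : String) (rows : Int) (cols : Int) (obstacles : List (Int × Int)) : Int × Int :=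
  pvRunB rows cols obstacles (0, 0) grid.toList

-- ===== PRECONDITION & SPEC =====
def Spec_final_position (grid : String) (rows : Int) (cols : Int) (obstacles : List (Int × Int)) (out : Int × Int) : Prop := out = final_position_alt grid rows cols obstacles
instance (grid : String) (rows : Int) (cols : Int) (obstacles : List (Int × Int)) (out : Int × Int) : Decidable (Spec_final_position grid rows cols obstacles out) := by unfold Spec_final_position; infer_instance

-- ===== CLAIM (what is proved, stated in full; the proofs are below) =====
def Claim_equal_final_position : Prop := ∀ (grid : String) (rows : Int) (cols : Int) (obstacles : List (Int × Int)), Dom_final_position grid rows cols obstacles → Spec_final_position grid rows cols obstacles (final_position grid rows cols obstacles)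

-- ===== LEMMAS AND PROOFS =====

-- characterisation of the guarded foldl-min/foldl-max scans
theorem foldl_min_le_iff (g : Int × Int → Prop) [DecidablePred g] (v : Int × Int → Int)
    (l : List (Int × Int)) (a t : Int) :
    l.foldl (fun s p => if g p then min s (v p) else s) a ≤ t ↔
      a ≤ t ∨ ∃ p ∈ l, g p ∧ v p ≤ t := by
  induction l generalizing a with
  | nil => simp
  | cons q l ih =>
    simp only [List.foldl_cons]
    by_cases hq : g q
    · simp only [if_pos hq]
      rw [ih]
      constructor
      · rintro (h | ⟨p, hp, hg, hv⟩)
        · rcases min_le_iff.mp h with h | h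
          · exact Or.inl h
          · exact Or.inr ⟨q, by simp, hq, h⟩
        · exact Or.inr ⟨p, List.mem_cons_of_mem _ hp, hg, hv⟩
      · rintro (h | ⟨p, hp, hg, hv⟩)
        · exact Or.inl (le_trans (min_le_left _ _) h)
        · rcases List.mem_cons.mp hp with rfl | hp'
          · exact Or.inl (le_trans (min_le_right _ _) hv)
          · exact Or.inr ⟨p, hp', hg, hv⟩
    · simp only [if_neg hq]
      rw [ih]
      constructor
      · rintro (h | ⟨p, hp, hg, hv⟩)
        · exact Or.inl h
        · exact Or.inr ⟨p, List.mem_cons_of_mem _ hp, hg, hv⟩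
      · rintro (h | ⟨p, hp, hg, hv⟩)
        · exact Or.inl h
        · rcases List.mem_cons.mp hp with rfl | hp'
          · exact absurd hg hq
          · exact Or.inr ⟨p, hp', hg, hv⟩

theorem foldl_max_ge_iff (g : Int × Int → Prop) [DecidablePred g] (v : Int × Int → Int)
    (l : List (Int × Int)) (a t : Int) :
    t ≤ l.foldl (fun s p => if g p then max s (v p) else s) a ↔
      t ≤ a ∨ ∃ p ∈ l, g p ∧ t ≤ v p := by
  induction l generalizing a with
  | nil => simp
  | cons q l ih =>
    simp only [List.foldl_cons]
    by_cases hq : g q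
    · simp only [if_pos hq]
      rw [ih]
      constructor
      · rintro (h | ⟨p, hp, hg, hv⟩)
        · rcases le_max_iff.mp h with h | h
          · exact Or.inl h
          · exact Or.inr ⟨q, by simp, hq, h⟩
        · exact Or.inr ⟨p, List.mem_cons_of_mem _ hp, hg, hv⟩
      · rintro (h | ⟨p, hp, hg, hv⟩)
        · exact Or.inl (le_trans h (le_max_left _ _))
        · rcases List.mem_cons.mp hp with rfl | hp'
          · exact Or.inl (le_trans hv (le_max_right _ _))
          · exact Or.inr ⟨p, hp', hg, hv⟩
    · simp only [if_neg hq]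
      rw [ih]
      constructor
      · rintro (h | ⟨p, hp, hg, hv⟩)
        · exact Or.inl h
        · exact Or.inr ⟨p, List.mem_cons_of_mem _ hp, hg, hv⟩
      · rintro (h | ⟨p, hp, hg, hv⟩)
        · exact Or.inl h
        · rcases List.mem_cons.mp hp with rfl | hp'
          · exact absurd hg hq
          · exact Or.inr ⟨p, hp', hg, hv⟩

-- "blocked ↔ stop reached" for each direction
theorem stopU_le_iff (x y rows : Int) (obs : List (Int × Int)) :
    pvStopU x y rows obs ≤ y ↔ rows - 1 ≤ y ∨ (x, y + 1) ∈ obs := by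
  unfold pvStopU
  rw [foldl_min_le_iff (fun p => p.1 = x ∧ y < p.2) (fun p => p.2 - 1)]
  constructor
  · rintro (h | ⟨p, hp, ⟨h1, h2⟩, h3⟩)
    · exact Or.inl h
    · right; have : p = (x, y + 1) := by obtain ⟨a, b⟩ := p; simp_all; omega
      rwa [this] at hp
  · rintro (h | h)
    · exact Or.inl h
    · exact Or.inr ⟨(x, y + 1), h, ⟨rfl, by omega⟩, by omega⟩

theorem stopD_ge_iff (x y : Int) (obs : List (Int × Int)) :
    y ≤ pvStopD x y obs ↔ y ≤ 0 ∨ (x, y - 1) ∈ obs := by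
  unfold pvStopD
  rw [foldl_max_ge_iff (fun p => p.1 = x ∧ p.2 < y) (fun p => p.2 + 1)]
  constructor
  · rintro (h | ⟨p, hp, ⟨h1, h2⟩, h3⟩)
    · exact Or.inl h
    · right; have : p = (x, y - 1) := by obtain ⟨a, b⟩ := p; simp_all; omega
      rwa [this] at hp
  · rintro (h | h)
    · exact Or.inl h
    · exact Or.inr ⟨(x, y - 1), h, ⟨rfl, by omega⟩, by omega⟩

theorem stopL_ge_iff (x y : Int) (obs : List (Int × Int)) :
    x ≤ pvStopL x y obs ↔ x ≤ 0 ∨ (x - 1, y) ∈ obs := by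
  unfold pvStopL
  rw [foldl_max_ge_iff (fun p => p.2 = y ∧ p.1 < x) (fun p => p.1 + 1)]
  constructor
  · rintro (h | ⟨p, hp, ⟨h1, h2⟩, h3⟩)
    · exact Or.inl h
    · right; have : p = (x - 1, y) := by obtain ⟨a, b⟩ := p; simp_all; omega
      rwa [this] at hp
  · rintro (h | h)
    · exact Or.inl h
    · exact Or.inr ⟨(x - 1, y), h, ⟨rfl, by omega⟩, by omega⟩

theorem stopR_le_iff (x y cols : Int) (obs : List (Int × Int)) :
    pvStopR x y cols obs ≤ x ↔ cols - 1 ≤ x ∨ (x + 1, y) ∈ obs := by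
  unfold pvStopR
  rw [foldl_min_le_iff (fun p => p.2 = y ∧ x < p.1) (fun p => p.1 - 1)]
  constructor
  · rintro (h | ⟨p, hp, ⟨h1, h2⟩, h3⟩)
    · exact Or.inl h
    · right; have : p = (x + 1, y) := by obtain ⟨a, b⟩ := p; simp_all; omega
      rwa [this] at hp
  · rintro (h | h)
    · exact Or.inl h
    · exact Or.inr ⟨(x + 1, y), h, ⟨rfl, by omega⟩, by omega⟩

-- stability of the stop values along an unblocked step
theorem stopU_step (x y rows : Int) (obs : List (Int × Int)) (h : (x, y + 1) ∉ obs) :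
    pvStopU x (y + 1) rows obs = pvStopU x y rows obs := by
  unfold pvStopU
  apply PySem.List.foldl_congr_mem
  intro s p hp
  have hp' : p ≠ (x, y + 1) := fun he => h (he ▸ hp)
  apply if_congr _ rfl rfl
  have hne : p.1 ≠ (x, y + 1).1 ∨ p.2 ≠ (x, y + 1).2 := by
    by_cases h1 : p.1 = (x, y + 1).1
    · right; intro h2; exact hp' (by obtain ⟨a, b⟩ := p; simp_all)
    · exact Or.inl h1
  constructor
  · rintro ⟨ha, hb⟩; exact ⟨ha, by omega⟩
  · rintro ⟨ha, hb⟩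
    refine ⟨ha, ?_⟩
    simp only [ha] at hne ⊢
    omega

theorem stopD_step (x y : Int) (obs : List (Int × Int)) (h : (x, y - 1) ∉ obs) :
    pvStopD x (y - 1) obs = pvStopD x y obs := by
  unfold pvStopD
  apply PySem.List.foldl_congr_mem
  intro s p hp
  have hp' : p ≠ (x, y - 1) := fun he => h (he ▸ hp)
  apply if_congr _ rfl rfl
  have hne : p.1 ≠ (x, y - 1).1 ∨ p.2 ≠ (x, y - 1).2 := by
    by_cases h1 : p.1 = (x, y - 1).1
    · right; intro h2; exact hp' (by obtain ⟨a, b⟩ := p; simp_all)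
    · exact Or.inl h1
  constructor
  · rintro ⟨ha, hb⟩; exact ⟨ha, by omega⟩
  · rintro ⟨ha, hb⟩
    refine ⟨ha, ?_⟩
    simp only [ha] at hne ⊢
    omega

theorem stopL_step (x y : Int) (obs : List (Int × Int)) (h : (x - 1, y) ∉ obs) :
    pvStopL (x - 1) y obs = pvStopL x y obs := by
  unfold pvStopL
  apply PySem.List.foldl_congr_mem
  intro s p hp
  have hp' : p ≠ (x - 1, y) := fun he => h (he ▸ hp)
  apply if_congr _ rfl rfl
  have hne : p.1 ≠ (x - 1, y).1 ∨ p.2 ≠ (x - 1, y).2 := by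
    by_cases h1 : p.1 = (x - 1, y).1
    · right; intro h2; exact hp' (by obtain ⟨a, b⟩ := p; simp_all)
    · exact Or.inl h1
  constructor
  · rintro ⟨ha, hb⟩; exact ⟨ha, by omega⟩
  · rintro ⟨ha, hb⟩
    refine ⟨ha, ?_⟩
    simp only [ha] at hne ⊢
    omega

theorem stopR_step (x y cols : Int) (obs : List (Int × Int)) (h : (x + 1, y) ∉ obs) :
    pvStopR (x + 1) y cols obs = pvStopR x y cols obs := by
  unfold pvStopR
  apply PySem.List.foldl_congr_mem
  intro s p hp
  have hp' : p ≠ (x + 1, y) := fun he => h (he ▸ hp)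
  apply if_congr _ rfl rfl
  have hne : p.1 ≠ (x + 1, y).1 ∨ p.2 ≠ (x + 1, y).2 := by
    by_cases h1 : p.1 = (x + 1, y).1
    · right; intro h2; exact hp' (by obtain ⟨a, b⟩ := p; simp_all)
    · exact Or.inl h1
  constructor
  · rintro ⟨ha, hb⟩; exact ⟨ha, by omega⟩
  · rintro ⟨ha, hb⟩
    refine ⟨ha, ?_⟩
    simp only [ha] at hne ⊢
    omega

-- A over a run of k identical moves, in closed form (one lemma per direction)
theorem runA_U (rows cols : Int) (obs : List (Int × Int)) (x y : Int) (k : Nat) :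
    (List.replicate k 'U').foldl (pvStepA rows cols obs) (x, y) =
      (x, max y (min (y + k) (pvStopU x y rows obs))) := by
  induction k generalizing y with
  | zero =>
    simp only [List.replicate_zero, List.foldl_nil, Nat.cast_zero, add_zero]
    have h : max y (min y (pvStopU x y rows obs)) = y := by omega
    rw [h]
  | succ k ih =>
    rw [List.replicate_succ, List.foldl_cons]
    by_cases hb : y < rows - 1 ∧ (x, y + 1) ∉ obs
    · obtain ⟨hb1, hb2⟩ := hb
      have hst : ¬ pvStopU x y rows obs ≤ y := by
        rw [stopU_le_iff]; push_neg; exact ⟨by omega, hb2⟩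
      have hstep : pvStepA rows cols obs (x, y) 'U' = (x, y + 1) := by
        simp [pvStepA, hb1, hb2]
      rw [hstep, ih, stopU_step x y rows obs hb2]
      congr 1
      push_cast
      omega
    · have hst : pvStopU x y rows obs ≤ y := by
        rw [stopU_le_iff]
        rcases not_and_or.mp hb with h | h
        · exact Or.inl (by omega)
        · exact Or.inr (not_not.mp h)
      have hstep : pvStepA rows cols obs (x, y) 'U' = (x, y) := by
        rcases not_and_or.mp hb with h | h
        · simp [pvStepA, h]
        · have h2 : (x, y + 1) ∈ obs := not_not.mp h
          simp [pvStepA, h2]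
      rw [hstep, ih]
      congr 1
      push_cast
      omega

theorem runA_D (rows cols : Int) (obs : List (Int × Int)) (x y : Int) (k : Nat) :
    (List.replicate k 'D').foldl (pvStepA rows cols obs) (x, y) =
      (x, min y (max (y - k) (pvStopD x y obs))) := by
  induction k generalizing y with
  | zero =>
    simp only [List.replicate_zero, List.foldl_nil, Nat.cast_zero, sub_zero]
    have h : min y (max y (pvStopD x y obs)) = y := by omega
    rw [h]
  | succ k ih =>
    rw [List.replicate_succ, List.foldl_cons]
    by_cases hb : y > 0 ∧ (x, y - 1) ∉ obs
    · obtain ⟨hb1, hb2⟩ := hb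
      have hst : ¬ y ≤ pvStopD x y obs := by
        rw [stopD_ge_iff]; push_neg; exact ⟨by omega, hb2⟩
      have hstep : pvStepA rows cols obs (x, y) 'D' = (x, y - 1) := by
        simp [pvStepA, hb1, hb2]
      rw [hstep, ih, stopD_step x y obs hb2]
      congr 1
      push_cast
      omega
    · have hst : y ≤ pvStopD x y obs := by
        rw [stopD_ge_iff]
        rcases not_and_or.mp hb with h | h
        · exact Or.inl (by omega)
        · exact Or.inr (not_not.mp h)
      have hstep : pvStepA rows cols obs (x, y) 'D' = (x, y) := by
        rcases not_and_or.mp hb with h | h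
        · simp [pvStepA, h]
        · have h2 : (x, y - 1) ∈ obs := not_not.mp h
          simp [pvStepA, h2]
      rw [hstep, ih]
      congr 1
      push_cast
      omega

theorem runA_L (rows cols : Int) (obs : List (Int × Int)) (x y : Int) (k : Nat) :
    (List.replicate k 'L').foldl (pvStepA rows cols obs) (x, y) =
      (min x (max (x - k) (pvStopL x y obs)), y) := by
  induction k generalizing x with
  | zero =>
    simp only [List.replicate_zero, List.foldl_nil, Nat.cast_zero, sub_zero]
    have h : min x (max x (pvStopL x y obs)) = x := by omega
    rw [h]
  | succ k ih =>
    rw [List.replicate_succ, List.foldl_cons]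
    by_cases hb : x > 0 ∧ (x - 1, y) ∉ obs
    · obtain ⟨hb1, hb2⟩ := hb
      have hst : ¬ x ≤ pvStopL x y obs := by
        rw [stopL_ge_iff]; push_neg; exact ⟨by omega, hb2⟩
      have hstep : pvStepA rows cols obs (x, y) 'L' = (x - 1, y) := by
        simp [pvStepA, hb1, hb2]
      rw [hstep, ih, stopL_step x y obs hb2]
      congr 1
      push_cast
      omega
    · have hst : x ≤ pvStopL x y obs := by
        rw [stopL_ge_iff]
        rcases not_and_or.mp hb with h | h
        · exact Or.inl (by omega)
        · exact Or.inr (not_not.mp h)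
      have hstep : pvStepA rows cols obs (x, y) 'L' = (x, y) := by
        rcases not_and_or.mp hb with h | h
        · simp [pvStepA, h]
        · have h2 : (x - 1, y) ∈ obs := not_not.mp h
          simp [pvStepA, h2]
      rw [hstep, ih]
      congr 1
      push_cast
      omega

theorem runA_R (rows cols : Int) (obs : List (Int × Int)) (x y : Int) (k : Nat) :
    (List.replicate k 'R').foldl (pvStepA rows cols obs) (x, y) =
      (max x (min (x + k) (pvStopR x y cols obs)), y) := by
  induction k generalizing x with
  | zero =>
    simp only [List.replicate_zero, List.foldl_nil, Nat.cast_zero, add_zero]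
    have h : max x (min x (pvStopR x y cols obs)) = x := by omega
    rw [h]
  | succ k ih =>
    rw [List.replicate_succ, List.foldl_cons]
    by_cases hb : x < cols - 1 ∧ (x + 1, y) ∉ obs
    · obtain ⟨hb1, hb2⟩ := hb
      have hst : ¬ pvStopR x y cols obs ≤ x := by
        rw [stopR_le_iff]; push_neg; exact ⟨by omega, hb2⟩
      have hstep : pvStepA rows cols obs (x, y) 'R' = (x + 1, y) := by
        simp [pvStepA, hb1, hb2]
      rw [hstep, ih, stopR_step x y cols obs hb2]
      congr 1
      push_cast
      omega
    · have hst : pvStopR x y cols obs ≤ x := by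
        rw [stopR_le_iff]
        rcases not_and_or.mp hb with h | h
        · exact Or.inl (by omega)
        · exact Or.inr (not_not.mp h)
      have hstep : pvStepA rows cols obs (x, y) 'R' = (x, y) := by
        rcases not_and_or.mp hb with h | h
        · simp [pvStepA, h]
        · have h2 : (x + 1, y) ∈ obs := not_not.mp h
          simp [pvStepA, h2]
      rw [hstep, ih]
      congr 1
      push_cast
      omega

-- a run of a non-move character does nothing
theorem runA_other (rows cols : Int) (obs : List (Int × Int)) (p : Int × Int) (c : Char)
    (hc : c ≠ 'U' ∧ c ≠ 'D' ∧ c ≠ 'L' ∧ c ≠ 'R') (k : Nat) :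
    (List.replicate k c).foldl (pvStepA rows cols obs) p = p := by
  induction k with
  | zero => rfl
  | succ k ih =>
    rw [List.replicate_succ, List.foldl_cons]
    have hstep : pvStepA rows cols obs p c = p := by
      obtain ⟨h1, h2, h3, h4⟩ := hc
      by_cases h5 : c = 'X' <;> simp [pvStepA, h1, h2, h3, h4, h5]
    rw [hstep, ih]

-- decompose a nonempty list into its leading run and the rest
theorem run_decomp (c : Char) (rest : List Char) :
    c :: rest = List.replicate (1 + (rest.takeWhile (· == c)).length) c ++
      rest.dropWhile (· == c) := by
  have htw : rest.takeWhile (· == c) = List.replicate (rest.takeWhile (· == c)).length c := by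
    apply List.eq_replicate_of_mem
    intro a ha
    have := List.mem_takeWhile_imp ha
    exact eq_of_beq this
  calc c :: rest = c :: (rest.takeWhile (· == c) ++ rest.dropWhile (· == c)) := by
        rw [List.takeWhile_append_dropWhile]
    _ = (c :: rest.takeWhile (· == c)) ++ rest.dropWhile (· == c) := rfl
    _ = _ := by
        conv_lhs => rw [htw]
        rw [← List.replicate_succ, Nat.add_comm 1 (rest.takeWhile (· == c)).length]

-- main equivalence: the step fold equals the run-length recursion
theorem fold_eq_run (rows cols : Int) (obs : List (Int × Int)) (l : List Char) (p : Int × Int) :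
    l.foldl (pvStepA rows cols obs) p = pvRunB rows cols obs p l := by
  induction hn : l.length using Nat.strong_induction_on generalizing l p with
  | _ n ih =>
    subst hn
    match l with
    | [] => simp [pvRunB.eq_def]
    | c :: rest =>
      obtain ⟨x, y⟩ := p
      have hdec := run_decomp c rest
      have hlen : (rest.dropWhile (· == c)).length < (c :: rest).length := by
        simp only [List.length_cons]
        exact Nat.lt_succ_of_le (List.length_dropWhile_le _ _)
      conv_lhs => rw [hdec]
      rw [List.foldl_append]
      conv_rhs => rw [pvRunB.eq_def]
      simp only []
      set k : Nat := 1 + (rest.takeWhile (· == c)).length with hk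
      by_cases hU : c = 'U'
      · subst hU
        rw [runA_U, ih _ hlen _ _ rfl]
        simp [hk]
      by_cases hD : c = 'D'
      · subst hD
        rw [runA_D, ih _ hlen _ _ rfl]
        simp [hU, hk]
      by_cases hL : c = 'L'
      · subst hL
        rw [runA_L, ih _ hlen _ _ rfl]
        simp [hU, hD, hk]
      by_cases hR : c = 'R'
      · subst hR
        rw [runA_R, ih _ hlen _ _ rfl]
        simp [hU, hD, hL, hk]
      · rw [runA_other rows cols obs (x, y) c ⟨hU, hD, hL, hR⟩, ih _ hlen _ _ rfl]
        simp [hU, hD, hL, hR]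

-- ===== VERDICT (by name: the statement is the Claim_ definition above) =====
theorem final_position_spec : Claim_equal_final_position := by
  intro grid rows cols obstacles _
  unfold Spec_final_position final_position final_position_alt
  exact fold_eq_run rows cols obstacles grid.toList (0, 0)
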